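-- pv_equiv track=rewrite | github.com/bbYYJnhA/Wu-Zi-Qi | hevristika.py | vrednost_beli
-- ===== SOURCE A (Python) =====
-- ZMAGA = 10000000
--
-- CRNI = 1
--
-- BELI = 2
--
-- def vrednost_beli(vrstica):
--     vrednost = 0
--     vrstica.append(CRNI)
--     prvi_konec = CRNI
--     trenutni = CRNI
--     trenutna_vrednost = 0
--     for el in vrstica:
--         if el == BELI:
--             trenutni = BELI
--             trenutna_vrednost += 1
--         elif el == 0:
--             if trenutni == BELI:
--                 if prvi_konec == 0:
--                     if trenutna_vrednost >= 5:
--                         vrednost += ZMAGA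
--                     if trenutna_vrednost == 4:
--                         vrednost += ZMAGA // 2
--                     if trenutna_vrednost == 3:
--                         vrednost += ZMAGA // 3
--                     vrednost += 4**trenutna_vrednost
--                     trenutna_vrednost = 0
--                     trenutni = 0
--                     prvi_konec = 0
--                 else:
--                     if trenutna_vrednost >= 5:
--                         vrednost += ZMAGA
--                     vrednost += 2**trenutna_vrednost
--                     trenutna_vrednost = 0
--                     trenutni = 0
--                     prvi_konec = 0
--
--             trenutni = 0
--             prvi_konec = 0
--             trenutna_vrednost = 0
--
--         elif el == CRNI:
--             if trenutni == BELI: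
--                 if prvi_konec == 0:
--                     if trenutna_vrednost >= 5:
--                         vrednost += ZMAGA
--                     vrednost += 2**trenutna_vrednost
--                     trenutna_vrednost = 0
--                     trenutni = CRNI
--                     prvi_konec = CRNI
--                 else:
--                     if trenutna_vrednost >= 5:
--                         vrednost += ZMAGA
--
--             trenutni = CRNI
--             prvi_konec = CRNI
--             trenutna_vrednost = 0
--
--         else:
--             assert False, "Neveljaven element v tabeli"
--
--     return vrednost
-- ===== SOURCE B (Python) =====
-- ZMAGA = 10000000
--
-- CRNI = 1
--
-- BELI = 2
--
-- def vrednost_beli(vrstica):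
--     # Same observable mutation as A: one CRNI appended to the argument.
--     vrstica.append(CRNI)
--     # Phase 1: materialize white runs as (length, left_open, right_open).
--     runs = []
--     left_open = False
--     run_len = 0
--     for el in vrstica:
--         if el == BELI:
--             run_len += 1
--         elif el == 0 or el == CRNI:
--             if run_len > 0:
--                 runs.append((run_len, left_open, el == 0))
--             left_open = (el == 0)
--             run_len = 0
--         else:
--             assert False, "Neveljaven element v tabeli"
--     # Phase 2: closed-form score per run.
--     vrednost = 0
--     for L, lo, ro in runs:
--         if ro:
--             if lo:
--                 if L >= 5:
--                     vrednost += ZMAGA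
--                 if L == 4:
--                     vrednost += ZMAGA // 2
--                 if L == 3:
--                     vrednost += ZMAGA // 3
--                 vrednost += 4 ** L
--             else:
--                 if L >= 5:
--                     vrednost += ZMAGA
--                 vrednost += 2 ** L
--         else:
--             if lo:
--                 if L >= 5:
--                     vrednost += ZMAGA
--                 vrednost += 2 ** L
--             else:
--                 if L >= 5:
--                     vrednost += ZMAGA
--     return vrednost
-- ===== Notes on version B (the rewrite author's own statement) =====
-- stated objective: alternative
-- what changed: Replaces A's flat 4-variable state machine with a two-phase run-list decomposition: one scan materializes white runs as (length, left_open, right_open) triples, then a separate loop adds a closed-form score per run.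
import Mathlib
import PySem

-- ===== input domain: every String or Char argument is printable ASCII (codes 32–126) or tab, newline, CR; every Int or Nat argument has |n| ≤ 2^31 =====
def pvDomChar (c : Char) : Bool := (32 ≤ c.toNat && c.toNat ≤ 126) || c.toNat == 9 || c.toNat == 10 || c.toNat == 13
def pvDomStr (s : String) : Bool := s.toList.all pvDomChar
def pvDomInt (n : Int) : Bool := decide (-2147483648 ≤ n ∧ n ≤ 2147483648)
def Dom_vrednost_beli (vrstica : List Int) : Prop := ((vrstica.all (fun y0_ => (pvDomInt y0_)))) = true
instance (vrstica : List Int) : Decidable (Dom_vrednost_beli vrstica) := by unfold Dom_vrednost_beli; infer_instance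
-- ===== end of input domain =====

-- B replaces A's flat state machine with a two-phase run-list decomposition (same cost);
-- both Pythons mutate the argument identically (append one CRNI); equivalence is about the return value.

-- ===== PORT A =====
-- A's loop state: (vrednost, prvi_konec, trenutni, trenutna_vrednost).
-- On an invalid element A raises AssertionError (excluded by Pre_); the port leaves the state unchanged there.
def vbStepA (s : Int × Int × Int × Int) (el : Int) : Int × Int × Int × Int :=
  let (vrednost, prvi_konec, trenutni, tv) := s
  if el = 2 then (vrednost, prvi_konec, 2, tv + 1)
  else if el = 0 then
    let v :=
      if trenutni = 2 then
        if prvi_konec = 0 then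
          vrednost + (if tv ≥ 5 then (10000000 : Int) else 0)
            + (if tv = 4 then PySem.Int.floordiv 10000000 2 else 0)
            + (if tv = 3 then PySem.Int.floordiv 10000000 3 else 0)
            + 4 ^ tv.toNat
        else vrednost + (if tv ≥ 5 then (10000000 : Int) else 0) + 2 ^ tv.toNat
      else vrednost
    (v, 0, 0, 0)
  else if el = 1 then
    let v :=
      if trenutni = 2 then
        if prvi_konec = 0 then
          vrednost + (if tv ≥ 5 then (10000000 : Int) else 0) + 2 ^ tv.toNat
        else vrednost + (if tv ≥ 5 then (10000000 : Int) else 0)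
      else vrednost
    (v, 1, 1, 0)
  else s

def vrednost_beli (vrstica : List Int) : Int :=
  ((vrstica ++ [1]).foldl vbStepA (0, 1, 1, 0)).1

-- ===== PORT B =====
-- Phase 1: materialize white runs as (length, left_open, right_open); invalid element leaves state unchanged.
def vbStepB (s : List (Int × Bool × Bool) × Bool × Int) (el : Int) : List (Int × Bool × Bool) × Bool × Int :=
  let (runs, lo, rl) := s
  if el = 2 then (runs, lo, rl + 1)
  else if el = 0 ∨ el = 1 then
    ((if rl > 0 then runs ++ [(rl, lo, decide (el = 0))] else runs), decide (el = 0), 0)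
  else s

-- Phase 2: closed-form score of one run.
def vbScore (r : Int × Bool × Bool) : Int :=
  let (L, lo, ro) := r
  if ro then
    if lo then
      (if L ≥ 5 then (10000000 : Int) else 0)
        + (if L = 4 then PySem.Int.floordiv 10000000 2 else 0)
        + (if L = 3 then PySem.Int.floordiv 10000000 3 else 0)
        + 4 ^ L.toNat
    else (if L ≥ 5 then (10000000 : Int) else 0) + 2 ^ L.toNat
  else
    if lo then (if L ≥ 5 then (10000000 : Int) else 0) + 2 ^ L.toNat
    else (if L ≥ 5 then (10000000 : Int) else 0)

def vrednost_beli_alt (vrstica : List Int) : Int :=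
  (((vrstica ++ [1]).foldl vbStepB ([], false, 0)).1).foldl (fun v r => v + vbScore r) 0

-- ===== PRECONDITION & SPEC =====
-- Pre_ excludes exactly the rows containing an element outside {0, CRNI, BELI}, on which A raises AssertionError.
def Pre_vrednost_beli (vrstica : List Int) : Prop :=
  ∀ el ∈ vrstica, el = 0 ∨ el = 1 ∨ el = 2
instance (vrstica : List Int) : Decidable (Pre_vrednost_beli vrstica) := by
  unfold Pre_vrednost_beli; infer_instance
def pvWitness_vrednost_beli : List Int := [0, 2, 2, 2, 0, 1, 2, 0]

def Spec_vrednost_beli (vrstica : List Int) (out : Int) : Prop := out = vrednost_beli_alt vrstica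
instance (vrstica : List Int) (out : Int) : Decidable (Spec_vrednost_beli vrstica out) := by unfold Spec_vrednost_beli; infer_instance

-- ===== CLAIM (what is proved, stated in full; the proofs are below) =====
def Claim_equal_vrednost_beli : Prop := ∀ (vrstica : List Int), Dom_vrednost_beli vrstica → Pre_vrednost_beli vrstica → Spec_vrednost_beli vrstica (vrednost_beli vrstica)

-- ===== LEMMAS AND PROOFS =====

-- Sum of run scores, as B's second loop computes it.
lemma vb_score_foldl (runs : List (Int × Bool × Bool)) (v : Int) :
    runs.foldl (fun v r => v + vbScore r) v = v + (runs.map vbScore).sum := by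
  induction runs generalizing v with
  | nil => simp
  | cons r rs ih => simp [List.foldl, ih, add_assoc]

-- Loop invariant: A's state is determined by B's run-building state.
lemma vb_inv (xs : List Int) (h : ∀ el ∈ xs, el = 0 ∨ el = 1 ∨ el = 2)
    (runs : List (Int × Bool × Bool)) (lo : Bool) (rl : Int) (hrl : 0 ≤ rl) :
    (xs.foldl vbStepA ((runs.map vbScore).sum,
        (if lo then 0 else 1), (if rl = 0 then (if lo then (0 : Int) else 1) else 2), rl)).1
      = (((xs.foldl vbStepB (runs, lo, rl)).1).map vbScore).sum := by
  induction xs generalizing runs lo rl with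
  | nil => simp
  | cons el xs ih =>
    have hel := h el (by simp)
    have h' : ∀ e ∈ xs, e = 0 ∨ e = 1 ∨ e = 2 := fun e he => h e (by simp [he])
    rcases hel with h0 | h1 | h2
    · -- el = 0 : delimiter, run (if any) closes right-open
      subst h0
      by_cases hz : rl = 0
      · subst hz
        cases lo <;> simpa [vbStepA, vbStepB] using ih h' runs true 0 le_rfl
      · have hpos : rl > 0 := lt_of_le_of_ne hrl (Ne.symm hz)
        have := ih h' (runs ++ [(rl, lo, true)]) true 0 le_rfl
        cases lo <;>
          simpa [vbStepA, vbStepB, hz, hpos, vbScore, add_assoc] using this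
    · -- el = 1 : black delimiter, run (if any) closes right-closed
      subst h1
      by_cases hz : rl = 0
      · subst hz
        cases lo <;> simpa [vbStepA, vbStepB] using ih h' runs false 0 le_rfl
      · have hpos : rl > 0 := lt_of_le_of_ne hrl (Ne.symm hz)
        have := ih h' (runs ++ [(rl, lo, false)]) false 0 le_rfl
        cases lo <;>
          simpa [vbStepA, vbStepB, hz, hpos, vbScore, add_assoc] using this
    · -- el = 2 : extend the current white run
      subst h2
      have hne : rl + 1 ≠ 0 := by omega
      simpa [vbStepA, vbStepB, hne] using ih h' runs lo (rl + 1) (by omega)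

-- ===== VERDICT (by name: the statement is the Claim_ definition above) =====
theorem vrednost_beli_spec : Claim_equal_vrednost_beli := by
  intro vrstica _ hpre
  unfold Spec_vrednost_beli vrednost_beli vrednost_beli_alt
  have h : ∀ el ∈ vrstica ++ [1], el = 0 ∨ el = 1 ∨ el = 2 := by
    intro el hel
    rcases List.mem_append.mp hel with h | h
    · exact hpre el h
    · simp at h; simp [h]
  have := vb_inv (vrstica ++ [1]) h [] false 0 le_rfl
  simpa [vb_score_foldl] using this
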